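-- pv_equiv track=rewrite | github.com/GitMonsters/octotetrahedral-agi | re_arc_bench_solves/5afe49d5.py | transform
-- ===== SOURCE A (Python) =====
-- from collections import Counter
--
-- def transform(grid):
--     H, W = len(grid), len(grid[0])
--     bg = Counter(v for r in grid for v in r).most_common(1)[0][0]
--
--     cc = Counter(v for r in grid for v in r if v != bg)
--     if not cc:
--         return [[bg] * 3 for _ in range(3)]
--
--     sorted_counts = sorted(cc.values())
--     min_count = sorted_counts[0]
--     num_colors = len(cc)
--     second_min = sorted_counts[1] if len(sorted_counts) > 1 else min_count
--
--     out = [[bg] * 3 for _ in range(3)]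
--
--     n = min(min_count, 3)
--     for r in range(3 - n, 3):
--         out[r][0] = 9
--
--     if min_count > 3 and (second_min - min_count > 1 or num_colors >= 4):
--         out[1][1] = 9
--
--     return out
-- ===== SOURCE B (Python) =====
-- def transform(grid):
--     counts = {}
--     for row in grid:
--         for v in row:
--             counts[v] = counts.get(v, 0) + 1
--     bg = max(counts, key=counts.get)
--
--     m1 = m2 = None
--     num = 0
--     for k, c in counts.items():
--         if k != bg:
--             num += 1
--             if m1 is None or c < m1:
--                 m1, m2 = c, m1
--             elif m2 is None or c < m2:
--                 m2 = c
--
--     out = [[bg] * 3 for _ in range(3)]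
--     if m1 is None:
--         return out
--
--     second = m2 if m2 is not None else m1
--     for r in range(3 - min(m1, 3), 3):
--         out[r][0] = 9
--     if m1 > 3 and (second - m1 > 1 or num >= 4):
--         out[1][1] = 9
--     return out
-- ===== Notes on version B (the rewrite author's own statement) =====
-- stated objective: simpler
-- what changed: One counting dict built once; bg selected with max(counts, key=counts.get) and the two smallest non-bg counts plus the distinct-color count obtained in a single selection scan, replacing A's second Counter pass over the grid and the sorted() of its values.
import Mathlib
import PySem

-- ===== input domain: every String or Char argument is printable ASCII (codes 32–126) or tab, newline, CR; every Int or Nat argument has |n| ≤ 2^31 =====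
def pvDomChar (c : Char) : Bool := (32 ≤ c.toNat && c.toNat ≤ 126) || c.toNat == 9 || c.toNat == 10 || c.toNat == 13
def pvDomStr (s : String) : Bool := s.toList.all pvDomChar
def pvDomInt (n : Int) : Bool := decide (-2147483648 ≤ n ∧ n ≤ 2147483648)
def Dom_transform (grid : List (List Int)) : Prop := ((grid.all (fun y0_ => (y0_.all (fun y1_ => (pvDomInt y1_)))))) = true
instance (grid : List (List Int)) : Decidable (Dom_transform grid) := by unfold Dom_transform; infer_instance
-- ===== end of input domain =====

-- B replaces A's second Counter pass and the sort of its values by one selection scan over the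
-- counting dict (bg = first max-count key, the two smallest non-bg counts and the distinct count
-- maintained in a single fold); same 3x3 output construction.

-- ===== PORT A =====
-- out[r][c] = 9 (r, c are in range and nonnegative wherever this program uses it)
def pvSetCell (o : List (List Int)) (r : Int) (c : Nat) (v : Int) : List (List Int) :=
  o.set r.toNat ((o.getD r.toNat []).set c v)

def transform (grid : List (List Int)) : List (List Int) :=
  -- H, W = len(grid), len(grid[0]) are unused; grid[0] raises IndexError on [] (outside Pre_)
  let flat := grid.flatten   -- v for r in grid for v in r
  match PySem.List.sorted (PySem.Dict.counter flat).items (fun kv => kv.2) true with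
  | [] => []   -- most_common(1)[0] raises IndexError on an empty Counter (outside Pre_)
  | (bg, _) :: _ =>
    let cc := PySem.Dict.counter (flat.filter (fun v => v ≠ bg))
    if cc.items = [] then
      List.replicate 3 (List.replicate 3 bg)
    else
      let sc := PySem.List.sorted cc.values (fun v => v) false
      let min_count := sc.headD 0                       -- sorted_counts[0] (cc nonempty here)
      let num_colors : Int := cc.items.length
      let second_min := (sc.drop 1).headD min_count     -- sorted_counts[1] if len > 1 else min_count
      let out := List.replicate 3 (List.replicate 3 bg)
      let n := min min_count 3
      let out := (PySem.List.pyRange (3 - n) 3 1).foldl (fun o r => pvSetCell o r 0 9) out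
      if min_count > 3 ∧ (second_min - min_count > 1 ∨ num_colors ≥ 4) then
        pvSetCell out 1 1 9
      else out

-- ===== PORT B =====
-- the body of B's if-branch: num += 1 and the (m1, m2) update
def pvScanStep (st : Option Int × Option Int × Int) (c : Int) : Option Int × Option Int × Int :=
  let num := st.2.2 + 1
  match st.1, st.2.1 with
  | none, m2 => (some c, m2, num)
  | some a, m2 =>
    if c < a then (some c, some a, num)
    else match m2 with
         | none => (some a, some c, num)
         | some b => if c < b then (some a, some c, num) else (some a, some b, num)

def transform_alt (grid : List (List Int)) : List (List Int) :=
  let counts := grid.foldl (fun d row =>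
      row.foldl (fun d v => d.insert v (d.getD v 0 + 1)) d) PySem.Dict.empty
  match PySem.List.max? counts.keys (fun k => counts.getD k 0) with
  | none => []   -- max() of an empty dict raises ValueError (outside Pre_)
  | some bg =>
    let st := counts.items.foldl (fun st kv =>
        if kv.1 ≠ bg then pvScanStep st kv.2 else st)
      ((none : Option Int), (none : Option Int), (0 : Int))
    let out := List.replicate 3 (List.replicate 3 bg)
    match st.1 with
    | none => out
    | some m1 =>
      let second := st.2.1.getD m1
      let out := (PySem.List.pyRange (3 - min m1 3) 3 1).foldl (fun o r => pvSetCell o r 0 9) out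
      if m1 > 3 ∧ (second - m1 > 1 ∨ st.2.2 ≥ 4) then
        pvSetCell out 1 1 9
      else out

-- ===== PRECONDITION & SPEC =====
-- A raises IndexError when the grid has no cell (len(grid[0]) on [], most_common(1)[0] on an
-- empty Counter); exactly those inputs are excluded.
def Pre_transform (grid : List (List Int)) : Prop := grid.flatten ≠ []
instance (grid : List (List Int)) : Decidable (Pre_transform grid) := by
  unfold Pre_transform; infer_instance
def pvWitness_transform : List (List Int) := [[1, 2], [2, 3]]

def Spec_transform (grid : List (List Int)) (out : List (List Int)) : Prop := out = transform_alt grid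
instance (grid : List (List Int)) (out : List (List Int)) : Decidable (Spec_transform grid out) := by unfold Spec_transform; infer_instance

-- ===== CLAIM (what is proved, stated in full; the proofs are below) =====
def Claim_equal_transform : Prop := ∀ (grid : List (List Int)), Dom_transform grid → Pre_transform grid → Spec_transform grid (transform grid)

-- ===== LEMMAS AND PROOFS =====

-- the running-max step of PySem.List.max? as a named function
def pvMaxStep {α : Type} (key : α → Int) (acc : Option α) (x : α) : Option α :=
  match acc with
  | none => some x
  | some m => if key m < key x then some x else some m

theorem pv_max?_eq_foldl {α : Type} (L : List α) (key : α → Int) :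
    PySem.List.max? L key = L.foldl (pvMaxStep key) none := rfl

theorem pv_head_insertBy_rev {α : Type} (key : α → Int) (x : α) (l : List α) :
    (PySem.List.insertBy (fun a b => decide (key b < key a)) x l).head?
      = pvMaxStep key l.head? x := by
  cases l with
  | nil => simp [PySem.List.insertBy, pvMaxStep]
  | cons y ys =>
    simp only [PySem.List.insertBy, List.head?_cons, pvMaxStep]
    split_ifs with h1 <;> simp_all

-- head of a reverse-sorted list = Python max(·, key): the first element of maximal key
theorem pv_head_sorted_rev {α : Type} (L : List α) (key : α → Int) :
    (PySem.List.sorted L key true).head? = PySem.List.max? L key := by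
  rw [PySem.List.sorted_rev_eq_foldl_insertBy, pv_max?_eq_foldl]
  suffices h : ∀ (acc : List α),
      (L.foldl (fun acc x => PySem.List.insertBy (fun a b => decide (key b < key a)) x acc) acc).head?
        = L.foldl (pvMaxStep key) acc.head? by
    exact h []
  induction L with
  | nil => intro acc; simp
  | cons x t ih =>
    intro acc
    simp only [List.foldl_cons]
    rw [ih, pv_head_insertBy_rev]

-- max over the keys of an association list, with a lookup that agrees with the stored values,
-- is the key of the max-by-value entry
theorem pv_max?_keys {α : Type} (L : List (α × Int)) (f : α → Int)
    (h : ∀ kv ∈ L, f kv.1 = kv.2) :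
    PySem.List.max? (L.map Prod.fst) f = (PySem.List.max? L (fun kv => kv.2)).map Prod.fst := by
  rw [pv_max?_eq_foldl, pv_max?_eq_foldl, List.foldl_map]
  suffices haux : ∀ (acc : Option (α × Int)), (∀ p, acc = some p → f p.1 = p.2) →
      L.foldl (fun acc x => pvMaxStep f acc x.1) (acc.map Prod.fst)
        = (L.foldl (pvMaxStep (fun kv => kv.2)) acc).map Prod.fst by
    exact haux none (by simp)
  induction L with
  | nil => intro acc _; simp
  | cons kv t ih =>
    intro acc hacc
    have hkv : f kv.1 = kv.2 := h kv (by simp)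
    have ht : ∀ p ∈ t, f p.1 = p.2 := fun p hp => h p (by simp [hp])
    simp only [List.foldl_cons]
    cases acc with
    | none =>
      have hstep : pvMaxStep f (Option.map Prod.fst (none : Option (α × Int))) kv.1
          = Option.map Prod.fst (some kv) := by simp [pvMaxStep]
      rw [hstep]
      exact ih ht (some kv) (by intro p hp; injection hp with he; subst he; exact hkv)
    | some m =>
      have hm : f m.1 = m.2 := hacc m rfl
      simp only [Option.map_some, pvMaxStep, hkv, hm]
      split_ifs with h1
      · exact ih ht (some kv) (by intro p hp; injection hp with he; subst he; exact hkv)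
      · exact ih ht (some m) (by intro p hp; injection hp with he; subst he; exact hm)

-- inserting into an (insertion-sort) accumulator updates its first two elements exactly as
-- B's (m1, m2, num) scan step does
theorem pv_insert_top2 (x : Int) (l : List Int) (n : Int) :
    (((PySem.List.insertBy (fun a b => decide (a < b)) x l).head?,
      (PySem.List.insertBy (fun a b => decide (a < b)) x l).tail.head?, n + 1))
      = pvScanStep (l.head?, l.tail.head?, n) x := by
  match l with
  | [] => simp [PySem.List.insertBy, pvScanStep]
  | [a] =>
    simp only [PySem.List.insertBy, pvScanStep]
    split_ifs with h1 <;> simp_all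
  | a :: b :: t =>
    simp only [PySem.List.insertBy, pvScanStep]
    by_cases h1 : x < a
    · simp [h1]
    · by_cases h2 : x < b
      · simp [h1, h2]
      · simp [h1, h2]

-- B's scan over a value list = (first two elements of the insertion sort, running length)
theorem pv_scan (V : List Int) : ∀ (l : List Int) (n : Int),
    V.foldl pvScanStep (l.head?, l.tail.head?, n)
      = ((V.foldl (fun acc x => PySem.List.insertBy (fun a b => decide (a < b)) x acc) l).head?,
         (V.foldl (fun acc x => PySem.List.insertBy (fun a b => decide (a < b)) x acc) l).tail.head?,
         n + V.length) := by
  induction V with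
  | nil => intro l n; simp
  | cons x t ih =>
    intro l n
    simp only [List.foldl_cons]
    rw [← pv_insert_top2 x l n, ih]
    simp only [List.length_cons]
    congr 2
    push_cast
    ring

theorem pv_sorted_id_eq (V : List Int) :
    PySem.List.sorted V (fun v => v) false
      = V.foldl (fun acc x => PySem.List.insertBy (fun a b => decide (a < b)) x acc) [] := rfl

theorem pv_add_filter (p : Int → Bool) (s : List Int) (x : Int) :
    (PySem.Set.add s x).filter p
      = if p x then PySem.Set.add (s.filter p) x else s.filter p := by
  by_cases hm : x ∈ s <;> by_cases hp : p x <;>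
    simp [PySem.Set.add, hm, hp, List.filter_append, List.mem_filter]

-- building a set from a filtered list = filtering the set
theorem pv_ofList_filter (p : Int → Bool) (l : List Int) :
    PySem.Set.ofList (l.filter p) = (PySem.Set.ofList l).filter p := by
  rw [PySem.Set.ofList_eq_foldl, PySem.Set.ofList_eq_foldl]
  suffices h : ∀ (s : List Int),
      (l.filter p).foldl PySem.Set.add (s.filter p) = (l.foldl PySem.Set.add s).filter p by
    simpa using h []
  induction l with
  | nil => intro s; simp
  | cons x t ih =>
    intro s
    by_cases hp : p x
    · simp only [List.filter_cons, hp, if_true, List.foldl_cons]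
      rw [← ih (PySem.Set.add s x), pv_add_filter, if_pos hp]
    · simp only [List.filter_cons, hp, Bool.false_eq_true, if_false, List.foldl_cons]
      rw [← ih (PySem.Set.add s x), pv_add_filter, if_neg (by simp [hp])]

theorem pv_fold_guard (bg : Int) (L : List (Int × Int)) (init : Option Int × Option Int × Int) :
    L.foldl (fun st kv => if kv.1 ≠ bg then pvScanStep st kv.2 else st) init
      = ((L.filter (fun kv => decide (kv.1 ≠ bg))).map Prod.snd).foldl pvScanStep init := by
  induction L generalizing init with
  | nil => rfl
  | cons kv t ih =>
    by_cases h : kv.1 = bg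
    · have e1 : List.foldl (fun st kv => if kv.1 ≠ bg then pvScanStep st kv.2 else st) init (kv :: t)
          = List.foldl (fun st kv => if kv.1 ≠ bg then pvScanStep st kv.2 else st) init t := by
        simp [h]
      have e2 : List.filter (fun kv => decide (kv.1 ≠ bg)) (kv :: t)
          = List.filter (fun kv => decide (kv.1 ≠ bg)) t := by simp [h]
      rw [e1, e2, ih]
    · have e1 : List.foldl (fun st kv => if kv.1 ≠ bg then pvScanStep st kv.2 else st) init (kv :: t)
          = List.foldl (fun st kv => if kv.1 ≠ bg then pvScanStep st kv.2 else st)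
              (pvScanStep init kv.2) t := by
        simp [h]
      have e2 : List.filter (fun kv => decide (kv.1 ≠ bg)) (kv :: t)
          = kv :: List.filter (fun kv => decide (kv.1 ≠ bg)) t := by simp [h]
      rw [e1, e2, List.map_cons, List.foldl_cons, ih]

theorem transform_eq (grid : List (List Int)) (hpre : grid.flatten ≠ []) :
    transform grid = transform_alt grid := by
  simp only [transform, transform_alt]
  rw [← List.foldl_flatten, PySem.Dict.foldl_insert_getD_add_one_eq_counter]
  generalize hflat : grid.flatten = flat at hpre ⊢
  have hne : (PySem.Dict.counter flat).items ≠ [] := by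
    rw [PySem.Dict.items_counter]
    simp only [ne_eq, List.map_eq_nil_iff]
    intro h0
    obtain ⟨x, hx⟩ := List.exists_mem_of_ne_nil _ hpre
    exact List.not_mem_nil (h0 ▸ (PySem.Set.mem_ofList flat x).mpr hx)
  rcases hsort : PySem.List.sorted (PySem.Dict.counter flat).items (fun kv => kv.2) true with _ | ⟨⟨bg, cnt⟩, rest⟩
  · exact absurd ((PySem.List.sorted_eq_nil_iff _ _ _).mp hsort) hne
  · have hmem : ∀ kv ∈ (PySem.Dict.counter flat).items, (PySem.Dict.counter flat).getD kv.1 0 = kv.2 := by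
      intro kv hkv
      rw [PySem.Dict.items_counter] at hkv
      obtain ⟨k, hk, rfl⟩ := List.mem_map.mp hkv
      simp [PySem.Dict.getD_counter]
    have hmax : PySem.List.max? (PySem.Dict.counter flat).keys
        (fun k => (PySem.Dict.counter flat).getD k 0) = some bg := by
      have hkeys : (PySem.Dict.counter flat).keys = ((PySem.Dict.counter flat).items).map Prod.fst := rfl
      rw [hkeys, pv_max?_keys _ _ hmem, ← pv_head_sorted_rev, hsort]
      rfl
    rw [hmax]
    simp only []
    have hccitems : (PySem.Dict.counter (flat.filter (fun v => decide (v ≠ bg)))).items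
        = ((PySem.Set.ofList flat).filter (fun v => decide (v ≠ bg))).map
            (fun k => (k, (List.count k flat : Int))) := by
      rw [PySem.Dict.items_counter, pv_ofList_filter]
      refine List.map_congr_left ?_
      intro k hk
      have hc := List.count_filter (p := fun v => decide (v ≠ bg)) (a := k) (l := flat)
        ((List.mem_filter.mp hk).2)
      rw [hc]
    have hvals : (PySem.Dict.counter (flat.filter (fun v => decide (v ≠ bg)))).values
        = ((PySem.Set.ofList flat).filter (fun v => decide (v ≠ bg))).map
            (fun k => (List.count k flat : Int)) := by
      show ((PySem.Dict.counter (flat.filter (fun v => decide (v ≠ bg)))).items).map Prod.snd = _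
      rw [hccitems, List.map_map]
      rfl
    have hstB : List.foldl (fun st kv => if kv.1 ≠ bg then pvScanStep st kv.2 else st)
        ((none : Option Int), (none : Option Int), (0:Int)) (PySem.Dict.counter flat).items
        = ((PySem.List.sorted (((PySem.Set.ofList flat).filter (fun v => decide (v ≠ bg))).map
              (fun k => (List.count k flat : Int))) (fun v => v) false).head?,
           (PySem.List.sorted (((PySem.Set.ofList flat).filter (fun v => decide (v ≠ bg))).map
              (fun k => (List.count k flat : Int))) (fun v => v) false).tail.head?,
           (0:Int) + (((PySem.Set.ofList flat).filter (fun v => decide (v ≠ bg))).map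
              (fun k => (List.count k flat : Int))).length) := by
      rw [pv_fold_guard, PySem.Dict.items_counter]
      simp only [List.filter_map, List.map_map, Function.comp_def]
      simp only [pv_sorted_id_eq]
      simpa using pv_scan (((PySem.Set.ofList flat).filter (fun v => decide (v ≠ bg))).map
        (fun k => (List.count k flat : Int))) [] 0
    rw [hstB, hccitems, hvals]
    generalize (List.filter (fun v => decide (v ≠ bg)) (PySem.Set.ofList flat)) = T
    cases T with
    | nil => simp [pv_sorted_id_eq]
    | cons k T' =>
      have hVne : (List.map (fun k => (List.count k flat : Int)) (k :: T')) ≠ [] := by simp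
      rcases hsc2 : PySem.List.sorted (List.map (fun k => (List.count k flat : Int)) (k :: T'))
          (fun v => v) false with _ | ⟨m, sc'⟩
      · exact absurd ((PySem.List.sorted_eq_nil_iff _ _ _).mp hsc2) hVne
      · simp [List.headD_eq_head?_getD]

-- ===== VERDICT (by name: the statement is the Claim_ definition above) =====
theorem transform_spec : Claim_equal_transform := by
  intro grid _hdom hpre
  exact transform_eq grid hpre
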